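-- pv_equiv track=rewrite | github.com/Francisco-Abdala/PropuestasSolucion-2025-1 | Propuestas de solucion/aa.py | contar_positivos
-- ===== SOURCE A (Python) =====
-- def contar_positivos(secuencia:str):
--     contar_total = 0
--     contar_K = 0
--     contar_H = 0
--     contar_R = 0
--     for aminoacido in secuencia:
--         if aminoacido == "K" or aminoacido == "k":
--             contar_total = contar_total +1
--             contar_K = contar_K + 1
--         elif aminoacido == "R" or aminoacido == "r":
--             contar_total = contar_total +1
--             contar_R = contar_R + 1
--         elif aminoacido == "H" or aminoacido == "h":
--             contar_total = contar_total +1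
--             contar_H = contar_H +1
--
--     return contar_total, contar_H, contar_K , contar_R
-- ===== SOURCE B (Python) =====
-- def contar_positivos(secuencia: str):
--     residuos = list(secuencia)
--     contar_K = residuos.count("K") + residuos.count("k")
--     contar_R = residuos.count("R") + residuos.count("r")
--     contar_H = residuos.count("H") + residuos.count("h")
--     return contar_K + contar_R + contar_H, contar_H, contar_K, contar_R
-- ===== Notes on version B (the rewrite author's own statement) =====
-- stated objective: idiomatic
-- what changed: Replaces the single loop with per-character if/elif branching and four running accumulators by counting passes: list(secuencia).count() for each residue letter, then the total as the sum of the three counts.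
import Mathlib
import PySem

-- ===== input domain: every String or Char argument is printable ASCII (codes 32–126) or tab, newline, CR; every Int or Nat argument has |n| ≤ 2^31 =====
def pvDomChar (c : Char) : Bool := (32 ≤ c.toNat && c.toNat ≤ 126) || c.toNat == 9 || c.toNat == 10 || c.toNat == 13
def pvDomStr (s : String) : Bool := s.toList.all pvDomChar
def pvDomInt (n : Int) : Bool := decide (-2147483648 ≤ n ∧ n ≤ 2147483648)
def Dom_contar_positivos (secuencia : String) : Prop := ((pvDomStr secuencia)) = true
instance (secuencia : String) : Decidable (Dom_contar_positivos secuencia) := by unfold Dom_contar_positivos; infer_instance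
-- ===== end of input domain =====

-- B replaces A's single loop with per-letter branch chains by three counting passes; objective: idiomatic.

-- ===== PORT A =====
-- A-side helper: the body of A's for-loop (branches in A's order, state (contar_total, contar_K, contar_H, contar_R))
def pasoA : Int × Int × Int × Int → Char → Int × Int × Int × Int
  | (t, k, h, r), aminoacido =>
    if aminoacido == 'K' || aminoacido == 'k' then (t + 1, k + 1, h, r)
    else if aminoacido == 'R' || aminoacido == 'r' then (t + 1, k, h, r + 1)
    else if aminoacido == 'H' || aminoacido == 'h' then (t + 1, k, h + 1, r)
    else (t, k, h, r)

def contar_positivos (secuencia : String) : Int × Int × Int × Int :=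
  let st := secuencia.toList.foldl pasoA (0, 0, 0, 0)
  (st.1, st.2.2.1, st.2.1, st.2.2.2)

-- ===== PORT B =====
def contar_positivos_alt (secuencia : String) : Int × Int × Int × Int :=
  let residuos := secuencia.toList
  let contar_K : Int := PySem.List.count residuos 'K' + PySem.List.count residuos 'k'
  let contar_R : Int := PySem.List.count residuos 'R' + PySem.List.count residuos 'r'
  let contar_H : Int := PySem.List.count residuos 'H' + PySem.List.count residuos 'h'
  (contar_K + contar_R + contar_H, contar_H, contar_K, contar_R)

-- ===== PRECONDITION & SPEC =====
def Spec_contar_positivos (secuencia : String) (out : Int × Int × Int × Int) : Prop := out = contar_positivos_alt secuencia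
instance (secuencia : String) (out : Int × Int × Int × Int) : Decidable (Spec_contar_positivos secuencia out) := by unfold Spec_contar_positivos; infer_instance

-- ===== CLAIM (what is proved, stated in full; the proofs are below) =====
def Claim_equal_contar_positivos : Prop := ∀ (secuencia : String), Dom_contar_positivos secuencia → Spec_contar_positivos secuencia (contar_positivos secuencia)

-- ===== LEMMAS AND PROOFS =====

theorem contar_fold_eq (l : List Char) (t k h r : Int) :
    l.foldl pasoA (t, k, h, r)
    = (t + ((l.count 'K' + l.count 'k' : Nat) : Int)
         + ((l.count 'R' + l.count 'r' : Nat) : Int)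
         + ((l.count 'H' + l.count 'h' : Nat) : Int),
       k + ((l.count 'K' + l.count 'k' : Nat) : Int),
       h + ((l.count 'H' + l.count 'h' : Nat) : Int),
       r + ((l.count 'R' + l.count 'r' : Nat) : Int)) := by
  induction l generalizing t k h r with
  | nil => simp
  | cons a l ih =>
    simp only [List.foldl_cons, pasoA]
    split_ifs with h1 h2 h3
    · rcases (by simpa using h1 : a = 'K' ∨ a = 'k') with rfl | rfl <;>
        · rw [ih]; simp; push_cast; ring_nf; exact ⟨trivial, trivial⟩
    · rcases (by simpa using h2 : a = 'R' ∨ a = 'r') with rfl | rfl <;>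
        · rw [ih]; simp; push_cast; ring_nf; exact ⟨trivial, trivial⟩
    · rcases (by simpa using h3 : a = 'H' ∨ a = 'h') with rfl | rfl <;>
        · rw [ih]; simp; push_cast; ring_nf; exact ⟨trivial, trivial⟩
    · simp only [Bool.or_eq_true, beq_iff_eq, not_or] at h1 h2 h3
      rw [ih]
      simp [h1.1, h1.2, h2.1, h2.2, h3.1, h3.2]

-- ===== VERDICT (by name: the statement is the Claim_ definition above) =====
theorem contar_positivos_spec : Claim_equal_contar_positivos := by
  intro s _
  unfold Spec_contar_positivos contar_positivos contar_positivos_alt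
  simp only [contar_fold_eq, PySem.List.count_eq]
  push_cast
  refine Prod.ext ?_ (Prod.ext ?_ (Prod.ext ?_ ?_)) <;> simp
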